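-- pv_equiv track=rewrite | github.com/ritamerhi/Revenge-of-The-Fallen | app.py | generate_triangle_shape
-- ===== SOURCE A (Python) =====
-- import math
--
-- GRID_SIZE = 10
--
-- def generate_triangle_shape(num_agents):
--     """
--     Create a triangle where:
--     - Top row has exactly 2 agents
--     - Each row increases by 2 agents as we go down
--     - Bottom row has the maximum number of agents
--     """
--     # Find how many full rows we can make (using quadratic formula)
--     r = int((-1 + math.sqrt(1 + 4 * num_agents)) / 2)
--
--     # If we can't even fill the first row with 2 agents, adjust
--     if r < 1 and num_agents >= 2:
--         r = 1
--
--     # Calculate how many agents we'll use in complete rows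
--     agents_in_complete_rows = r * (r + 1)
--
--     # Remaining agents for the last partial row (if any)
--     remaining_agents = num_agents - agents_in_complete_rows
--
--     # Determine agents per row (starting from the top with 2 agents)
--     agents_per_row = []
--     for i in range(r):
--         agents_per_row.append(2 * (i + 1))  # 2, 4, 6, 8, ...
--
--     # Add the last partial row if needed
--     if remaining_agents > 0:
--         agents_per_row.append(remaining_agents)
--
--     # Now create positions for each agent
--     positions = []
--     for row, num_in_row in enumerate(agents_per_row):
--         # Center the agents in this row
--         start_col = (GRID_SIZE - num_in_row) // 2
--
--         # Add agents for this row
--         for col in range(num_in_row):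
--             positions.append((row, start_col + col))
--
--     return positions
-- ===== SOURCE B (Python) =====
-- GRID_SIZE = 10
--
-- def generate_triangle_shape(num_agents):
--     """Iteratively peel off rows of width 2, 4, 6, ... while enough agents
--     remain, emitting centered positions directly; no sqrt needed."""
--     positions = []
--     remaining = num_agents
--     size = 2
--     row = 0
--     while remaining >= size:
--         start = (GRID_SIZE - size) // 2
--         for col in range(size):
--             positions.append((row, start + col))
--         remaining -= size
--         size += 2
--         row += 1
--     if remaining > 0:
--         start = (GRID_SIZE - remaining) // 2
--         for col in range(remaining):
--             positions.append((row, start + col))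
--     return positions
-- ===== Notes on version B (the rewrite author's own statement) =====
-- stated objective: alternative
-- what changed: Replaces the float-sqrt quadratic-formula row count and the intermediate agents_per_row list with a single loop that peels rows of width 2,4,6,... off the agent count and emits centered positions directly.
import Mathlib
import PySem

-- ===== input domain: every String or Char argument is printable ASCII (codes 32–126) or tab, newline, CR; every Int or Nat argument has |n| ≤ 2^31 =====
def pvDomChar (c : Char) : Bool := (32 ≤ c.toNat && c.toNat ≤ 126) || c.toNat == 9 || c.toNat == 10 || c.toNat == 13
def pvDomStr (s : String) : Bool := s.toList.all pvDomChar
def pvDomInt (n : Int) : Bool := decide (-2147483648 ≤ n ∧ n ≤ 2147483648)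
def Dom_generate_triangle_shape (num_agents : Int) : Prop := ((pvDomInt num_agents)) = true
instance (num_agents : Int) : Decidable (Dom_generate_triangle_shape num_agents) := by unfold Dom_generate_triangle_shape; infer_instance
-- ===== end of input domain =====

-- B replaces A's float-sqrt row-count formula and intermediate row-width list with a single
-- loop peeling rows of width 2,4,6,… off the count and emitting positions directly (alternative
-- decomposition, same output; on num_agents < 0 A raises ValueError while B returns []).

-- ===== PORT A =====
def generate_triangle_shape (num_agents : Int) : List (Int × Int) :=
  -- r = int((-1 + math.sqrt(1 + 4*num_agents)) / 2): ported via Nat.sqrt; EXACT on the domain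
  -- 0 ≤ num_agents ≤ 2^31 (the float sqrt there is within 1e-10 of the true root, far below the
  -- gap to the next integer, so the truncation equals ⌊(√(1+4n)-1)/2⌋ = (Nat.sqrt(1+4n)-1)/2);
  -- for num_agents < 0 Python raises ValueError (excluded by Pre_).
  let r : Int := ((Nat.sqrt (1 + 4 * num_agents).toNat - 1) / 2 : Nat)
  let r : Int := if r < 1 ∧ num_agents ≥ 2 then 1 else r
  let agents_in_complete_rows : Int := r * (r + 1)
  let remaining_agents : Int := num_agents - agents_in_complete_rows
  let agents_per_row : List Int :=
    (PySem.List.pyRange 0 r 1).foldl (fun acc i => acc ++ [2 * (i + 1)]) []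
  let agents_per_row : List Int :=
    if remaining_agents > 0 then agents_per_row ++ [remaining_agents] else agents_per_row
  (PySem.List.enumerate agents_per_row 0).foldl
    (fun positions p =>
      let start_col := PySem.Int.floordiv (10 - p.2) 2
      (PySem.List.pyRange 0 p.2 1).foldl
        (fun positions col => positions ++ [(p.1, start_col + col)]) positions) []

-- ===== PORT B =====
-- the while-loop of Source B: peel a row of `size` while enough agents remain, then a partial row
def pvAltLoop (remaining size row : Int) : List (Int × Int) :=
  if _h : 2 ≤ size ∧ size ≤ remaining then
    ((PySem.List.pyRange 0 size 1).map
        (fun col => (row, PySem.Int.floordiv (10 - size) 2 + col)))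
      ++ pvAltLoop (remaining - size) (size + 2) (row + 1)
  else if 0 < remaining then
    (PySem.List.pyRange 0 remaining 1).map
      (fun col => (row, PySem.Int.floordiv (10 - remaining) 2 + col))
  else []
  termination_by remaining.toNat
  decreasing_by omega
  -- ('2 ≤ size' only totalizes the recursion; Source B's size starts at 2 and only grows)

def generate_triangle_shape_alt (num_agents : Int) : List (Int × Int) :=
  pvAltLoop num_agents 2 0

-- ===== PRECONDITION & SPEC =====
-- Pre_ excludes num_agents < 0, where A raises ValueError (math.sqrt of a negative argument).
def Pre_generate_triangle_shape (num_agents : Int) : Prop := 0 ≤ num_agents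
instance (num_agents : Int) : Decidable (Pre_generate_triangle_shape num_agents) := by
  unfold Pre_generate_triangle_shape; infer_instance

def pvWitness_generate_triangle_shape : Int := 7

def Spec_generate_triangle_shape (num_agents : Int) (out : List (Int × Int)) : Prop :=
  out = generate_triangle_shape_alt num_agents
instance (num_agents : Int) (out : List (Int × Int)) : Decidable (Spec_generate_triangle_shape num_agents out) := by
  unfold Spec_generate_triangle_shape; infer_instance

-- ===== CLAIM (what is proved, stated in full; the proofs are below) =====
def Claim_equal_generate_triangle_shape : Prop := ∀ (num_agents : Int), Dom_generate_triangle_shape num_agents → Pre_generate_triangle_shape num_agents → Spec_generate_triangle_shape num_agents (generate_triangle_shape num_agents)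

-- ===== LEMMAS AND PROOFS =====

-- one centered row of width w at row index `row`
def pvEmitRow (row w : Int) : List (Int × Int) :=
  (PySem.List.pyRange 0 w 1).map (fun col => (row, PySem.Int.floordiv (10 - w) 2 + col))

-- common shape both programs produce: k full rows of widths size, size+2, …, then a partial row
def pvRowsSpec : Nat → Int → Int → Int → List (Int × Int)
  | 0, row, _, rem => if 0 < rem then pvEmitRow row rem else []
  | (k+1), row, size, rem => pvEmitRow row size ++ pvRowsSpec k (row + 1) (size + 2) rem

-- total number of agents in k full rows starting at width `size`
def pvWidthSum : Nat → Int → Int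
  | 0, _ => 0
  | (k+1), size => size + pvWidthSum (k) (size + 2)

lemma pvWidthSum_nonneg (k : Nat) : ∀ size : Int, 0 ≤ size → 0 ≤ pvWidthSum k size := by
  induction k with
  | zero => intro size _; simp [pvWidthSum]
  | succ k ih =>
      intro size hs
      have := ih (size + 2) (by omega)
      simp only [pvWidthSum]; omega

lemma pvWidthSum_two (k : Nat) : ∀ size : Int, pvWidthSum k size = k * size + k * (k - 1) := by
  induction k with
  | zero => intro size; simp [pvWidthSum]
  | succ k ih =>
      intro size
      have := ih (size + 2)
      simp only [pvWidthSum, this]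
      push_cast
      ring

lemma pvAltLoop_eq_rowsSpec (k : Nat) : ∀ (size row rem : Int), 2 ≤ size → 0 ≤ rem →
    rem < size + 2 * k → pvAltLoop (pvWidthSum k size + rem) size row = pvRowsSpec k row size rem := by
  induction k with
  | zero =>
      intro size row rem h2 h0 hlt
      rw [pvAltLoop]
      simp only [pvWidthSum, zero_add]
      rw [dif_neg (by omega)]
      simp only [pvRowsSpec, pvEmitRow]
  | succ k ih =>
      intro size row rem h2 h0 hlt
      have hws : 0 ≤ pvWidthSum k (size + 2) := pvWidthSum_nonneg k _ (by omega)
      rw [pvAltLoop]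
      rw [dif_pos (by simp only [pvWidthSum]; constructor <;> omega)]
      simp only [pvWidthSum]
      have harg : size + pvWidthSum k (size + 2) + rem - size = pvWidthSum k (size + 2) + rem := by ring
      rw [harg, ih (size + 2) (row + 1) rem (by omega) h0 (by omega)]
      rfl

-- A's outer loop body equals 'append one emitted row'
lemma pvFoldl_eq_flatMap (l : List (Int × Int)) (init : List (Int × Int)) :
    l.foldl
      (fun positions p =>
        (PySem.List.pyRange 0 p.2 1).foldl
          (fun positions col => positions ++ [(p.1, PySem.Int.floordiv (10 - p.2) 2 + col)])
          positions) init
    = init ++ l.flatMap (fun p => pvEmitRow p.1 p.2) := by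
  induction l generalizing init with
  | nil => simp
  | cons x xs ih =>
      simp only [List.foldl_cons, List.flatMap_cons]
      rw [PySem.List.foldl_append_singleton_eq_map, ih, pvEmitRow, List.append_assoc]

-- enumerating the width list 2·(row+1), 2·(row+2), … (+ optional partial row) and emitting
-- each row is pvRowsSpec
lemma pvEnum_flat_eq_rowsSpec (k : Nat) : ∀ (row rem : Int),
    (PySem.List.enumerate
        ((PySem.List.pyRange row (row + k) 1).map (fun i => 2 * (i + 1)) ++
          (if 0 < rem then [rem] else [])) row).flatMap (fun p => pvEmitRow p.1 p.2)
      = pvRowsSpec k row (2 * (row + 1)) rem := by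
  induction k with
  | zero =>
      intro row rem
      rw [PySem.List.pyRange_one_eq_nil (by omega)]
      simp only [List.map_nil, List.nil_append, pvRowsSpec]
      split
      · simp [PySem.List.enumerate_cons, PySem.List.enumerate_nil]
      · simp [PySem.List.enumerate_nil]
  | succ k ih =>
      intro row rem
      rw [show ((k + 1 : Nat) : Int) = (k : Int) + 1 by norm_cast,
        show row + ((k : Int) + 1) = (row + 1) + k by ring,
        PySem.List.pyRange_one_cons (by push_cast; omega)]
      simp only [List.map_cons, List.cons_append, PySem.List.enumerate_cons, List.flatMap_cons]
      rw [ih (row + 1) rem]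
      simp only [pvRowsSpec]
      norm_num
      ring_nf

lemma pvSqrt_bounds (n : Int) (hn : 0 ≤ n) :
    let r : Int := ((Nat.sqrt (1 + 4 * n).toNat - 1) / 2 : Nat)
    r * (r + 1) ≤ n ∧ n < (r + 1) * (r + 2) := by
  intro r
  set m : Nat := (1 + 4 * n).toNat with hm
  have hmn : (m : Int) = 1 + 4 * n := by omega
  set s : Nat := Nat.sqrt m with hs
  have h1 : s * s ≤ m := by have := Nat.sqrt_le' m; rw [pow_two] at this; exact this
  have h2 : m < (s + 1) * (s + 1) := by
    have := Nat.lt_succ_sqrt' m; rw [Nat.succ_eq_add_one, pow_two] at this; exact this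
  have hs1 : 1 ≤ s := by
    by_contra h
    have : s = 0 := by omega
    rw [this] at h2; omega
  set a : Nat := (s - 1) / 2 with ha
  have hlo : 2 * a + 1 ≤ s := by omega
  have hhi : s ≤ 2 * a + 2 := by omega
  have hl : (2 * a + 1) * (2 * a + 1) ≤ m := le_trans (Nat.mul_le_mul hlo hlo) h1
  have hh : m < (2 * a + 3) * (2 * a + 3) :=
    lt_of_lt_of_le h2 (Nat.mul_le_mul (by omega) (by omega))
  have hra : r = (a : Int) := by simp [r, ha, hs, hm]
  rw [hra]
  have hl' : (2 * (a : Int) + 1) * (2 * a + 1) ≤ m := by exact_mod_cast hl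
  have hh' : (m : Int) < (2 * (a : Int) + 3) * (2 * a + 3) := by exact_mod_cast hh
  constructor <;> nlinarith [hmn]

-- ===== VERDICT (by name: the statement is the Claim_ definition above) =====
theorem generate_triangle_shape_spec : Claim_equal_generate_triangle_shape := by
  intro n hdom hn
  unfold Pre_generate_triangle_shape at hn
  unfold Spec_generate_triangle_shape
  have hb := pvSqrt_bounds n hn
  simp only [generate_triangle_shape, generate_triangle_shape_alt]
  set a : Nat := (Nat.sqrt (1 + 4 * n).toNat - 1) / 2 with ha
  simp only at hb
  obtain ⟨hb1, hb2⟩ := hb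
  have ha0 : (0 : Int) ≤ (a : Int) := Int.natCast_nonneg _
  have hne : ¬((a : Int) < 1 ∧ n ≥ 2) := by
    rintro ⟨h1, h2⟩
    have haz : (a : Int) = 0 := by omega
    rw [haz] at hb2
    omega
  rw [if_neg hne]
  rw [PySem.List.foldl_append_singleton_eq_map, List.nil_append, pvFoldl_eq_flatMap,
    List.nil_append]
  have hflat := pvEnum_flat_eq_rowsSpec a 0 (n - (a : Int) * ((a : Int) + 1))
  simp only [zero_add] at hflat
  rw [show ∀ (l : List Int) (x : Int), (if x > 0 then l ++ [x] else l) = l ++ (if 0 < x then [x] else []) from fun l x => by split <;> simp,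
    hflat]
  have hub : n - (a : Int) * ((a : Int) + 1) < 2 + 2 * (a : Int) := by nlinarith
  have hsum : n = pvWidthSum a 2 + (n - (a : Int) * ((a : Int) + 1)) := by
    rw [pvWidthSum_two]
    ring
  have hB : pvAltLoop n 2 0 = pvRowsSpec a 0 2 (n - (a : Int) * ((a : Int) + 1)) := by
    conv_lhs => rw [hsum]
    exact pvAltLoop_eq_rowsSpec a 2 0 _ (by omega) (by nlinarith) (by omega)
  rw [hB]
  norm_num
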